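-- pv_equiv track=rewrite | github.com/jbazel/l3-Project-Jazz-Heuristics | chord_corpus_builder.py | update_duo_corp
-- ===== SOURCE A (Python) =====
-- def stringify(val):
--     return ','.join([str(x) for x in val])
--
-- def update_duo_corp(chords, melodies, corp):
--     for chord in chords:
--         chord = stringify(chord)
--         if chord not in corp:
--             corp[chord] = dict()
--
--         for melody in melodies:
--             melody = stringify(melody)
--             if melody in corp[chord]:
--                 corp[chord][melody] += 1
--             else:
--                 corp[chord][melody] = 1
--     return corp
-- ===== SOURCE B (Python) =====
-- def stringify(val):
--     return ','.join([str(x) for x in val])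
--
-- def update_duo_corp(chords, melodies, corp):
--     # Closed form: each distinct chord key with multiplicity t gains t * count(melody)
--     # for every distinct melody string, instead of one increment per (chord, melody) pair.
--     mel_count = {}
--     for melody in melodies:
--         k = stringify(melody)
--         mel_count[k] = mel_count.get(k, 0) + 1
--     chord_mult = {}
--     for chord in chords:
--         k = stringify(chord)
--         chord_mult[k] = chord_mult.get(k, 0) + 1
--     for k in list(corp):
--         if k in chord_mult:
--             t = chord_mult[k]
--             inner = corp[k]
--             out = {}
--             for mk, v in inner.items():
--                 out[mk] = v + t * mel_count.get(mk, 0)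
--             for mk, c in mel_count.items():
--                 if mk not in inner:
--                     out[mk] = t * c
--             corp[k] = out
--     for k, t in chord_mult.items():
--         if k not in corp:
--             corp[k] = {mk: t * c for mk, c in mel_count.items()}
--     return corp
-- ===== Notes on version B (the rewrite author's own statement) =====
-- stated objective: alternative
-- what changed: A increments a nested dict once per (chord, melody) pair; B computes two frequency tables (stringified melodies and stringified chords) in single passes and then writes each result cell in closed form as old + multiplicity(chord) * count(melody), mapping once over the existing corp entries and appending the fresh chord rows, so the nested per-pair increment loop disappears.
import Mathlib
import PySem

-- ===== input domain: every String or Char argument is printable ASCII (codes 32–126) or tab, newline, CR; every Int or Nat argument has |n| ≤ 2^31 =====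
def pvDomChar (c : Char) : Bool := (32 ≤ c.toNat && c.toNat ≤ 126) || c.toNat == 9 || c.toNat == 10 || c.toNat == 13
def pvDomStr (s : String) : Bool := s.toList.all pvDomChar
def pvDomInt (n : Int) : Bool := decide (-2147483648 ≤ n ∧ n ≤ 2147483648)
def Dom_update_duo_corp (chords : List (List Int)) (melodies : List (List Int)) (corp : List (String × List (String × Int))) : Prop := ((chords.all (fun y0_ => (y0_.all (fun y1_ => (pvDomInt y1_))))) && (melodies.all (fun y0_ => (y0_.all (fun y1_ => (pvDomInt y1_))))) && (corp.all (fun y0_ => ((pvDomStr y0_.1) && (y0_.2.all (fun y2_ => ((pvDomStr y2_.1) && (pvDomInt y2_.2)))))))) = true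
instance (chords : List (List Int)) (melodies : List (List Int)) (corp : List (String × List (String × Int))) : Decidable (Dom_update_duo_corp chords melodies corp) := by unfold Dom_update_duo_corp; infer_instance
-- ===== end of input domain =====

-- B replaces A's nested per-(chord, melody) increment loop by a closed form: two frequency
-- tables built once, then each result cell is old + multiplicity(chord) * count(melody)
-- (alternative decomposition; A mutates `corp` in place in Python and B performs the same
-- in-place mutation — equality is proved on the returned value).

-- ===== PORT A =====
-- shared helper: stringify(val) = ','.join([str(x) for x in val])
def stringify (val : List Int) : String := PySem.Str.join "," (val.map PySem.Int.toStr)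
-- boundary conversion between the signature's association lists and PySem.Dict
def pvWrap (corp : List (String × List (String × Int))) : PySem.Dict String (PySem.Dict String Int) :=
  ⟨corp.map (fun p => (p.1, ⟨p.2⟩))⟩
def pvUnwrap (d : PySem.Dict String (PySem.Dict String Int)) : List (String × List (String × Int)) :=
  d.items.map (fun p => (p.1, p.2.items))

-- body of A's outer loop: ensure corp[chord] exists, then bump corp[chord][melody] per melody
-- (corp[chord] is read via modify's getD default: the key was ensured present just above)
def pvStepA (melodies : List (List Int)) (acc : PySem.Dict String (PySem.Dict String Int)) (chord : List Int) : PySem.Dict String (PySem.Dict String Int) :=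
  let c := stringify chord
  let acc := if acc.contains c then acc else acc.insert c PySem.Dict.empty
  melodies.foldl (fun acc melody =>
    let m := stringify melody
    acc.modify c PySem.Dict.empty (fun inner =>
      if inner.contains m then inner.insert m (inner.getD m 0 + 1)
      else inner.insert m 1)) acc

def update_duo_corp (chords : List (List Int)) (melodies : List (List Int)) (corp : List (String × List (String × Int))) : List (String × List (String × Int)) :=
  pvUnwrap (chords.foldl (pvStepA melodies) (pvWrap corp))

-- ===== PORT B =====
-- Source B's two counting loops: frequency table of the stringified lists
def pvCountStr (xs : List (List Int)) : PySem.Dict String Int :=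
  xs.foldl (fun d v => d.insert (stringify v) (d.getD (stringify v) 0 + 1)) PySem.Dict.empty
-- Source B's `out` row: existing cells gain t * count in place, unseen melody keys are appended scaled by t
def pvBumped (melC : PySem.Dict String Int) (t : Int) (inner : List (String × Int)) : List (String × Int) :=
  inner.map (fun p => (p.1, p.2 + t * melC.getD p.1 0))
  ++ (melC.items.filter (fun q => inner.all (fun p => p.1 != q.1))).map (fun q => (q.1, t * q.2))

def update_duo_corp_alt (chords : List (List Int)) (melodies : List (List Int)) (corp : List (String × List (String × Int))) : List (String × List (String × Int)) :=
  let melC := pvCountStr melodies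
  let chordC := pvCountStr chords
  corp.map (fun p => if chordC.contains p.1 then (p.1, pvBumped melC (chordC.getD p.1 0) p.2) else p)
  ++ (chordC.items.filter (fun q => corp.all (fun p => p.1 != q.1))).map
      (fun q => (q.1, melC.items.map (fun r => (r.1, q.2 * r.2))))

-- ===== PRECONDITION & SPEC =====
-- Pre_ excludes only association lists with duplicate keys (in corp or in an inner dict):
-- those represent no Python dict, so A never receives them.
def Pre_update_duo_corp (chords : List (List Int)) (melodies : List (List Int)) (corp : List (String × List (String × Int))) : Prop :=
  (corp.map Prod.fst).Nodup ∧ ∀ p ∈ corp, (p.2.map Prod.fst).Nodup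
instance (chords : List (List Int)) (melodies : List (List Int)) (corp : List (String × List (String × Int))) : Decidable (Pre_update_duo_corp chords melodies corp) := by unfold Pre_update_duo_corp; infer_instance

def pvWitness_update_duo_corp : List (List Int) × List (List Int) × (List (String × List (String × Int))) :=
  ([[60, 64], [60, 64], [7]], [[1], [1], [2]], [("60,64", [("1", 1)]), ("9", [])])

def Spec_update_duo_corp (chords : List (List Int)) (melodies : List (List Int)) (corp : List (String × List (String × Int))) (out : List (String × List (String × Int))) : Prop := out = update_duo_corp_alt chords melodies corp
instance (chords : List (List Int)) (melodies : List (List Int)) (corp : List (String × List (String × Int))) (out : List (String × List (String × Int))) : Decidable (Spec_update_duo_corp chords melodies corp out) := by unfold Spec_update_duo_corp; infer_instance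

-- ===== CLAIM (what is proved, stated in full; the proofs are below) =====
def Claim_equal_update_duo_corp : Prop := ∀ (chords : List (List Int)) (melodies : List (List Int)) (corp : List (String × List (String × Int))), Dom_update_duo_corp chords melodies corp → Pre_update_duo_corp chords melodies corp → Spec_update_duo_corp chords melodies corp (update_duo_corp chords melodies corp)

-- ===== LEMMAS AND PROOFS =====
-- proof-side abbreviations
def pvAdd (d : PySem.Dict String Int) (kv : String × Int) : PySem.Dict String Int :=
  d.insert kv.1 (d.getD kv.1 0 + kv.2)
def pvBump (d : PySem.Dict String Int) (s : String) : PySem.Dict String Int :=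
  d.insert s (d.getD s 0 + 1)
-- the per-chord merge of a fixed count table (intermediate between A's and B's shapes)
def pvStepB (counts : PySem.Dict String Int) (acc : PySem.Dict String (PySem.Dict String Int)) (chord : List Int) : PySem.Dict String (PySem.Dict String Int) :=
  let key := stringify chord
  let acc := acc.setdefault key PySem.Dict.empty
  counts.items.foldl (fun acc kv =>
    acc.modify key PySem.Dict.empty (fun inner => inner.insert kv.1 (inner.getD kv.1 0 + kv.2))) acc

-- two inserts at distinct keys commute when the first key is already present
lemma pv_insert_comm (v : PySem.Dict String Int) (s k : String) (x y : Int)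
    (hv : v.contains s = true) (hks : k ≠ s) :
    (v.insert s x).insert k y = (v.insert k y).insert s x := by
  by_cases hk : v.contains k = true
  · have h1 : (v.insert s x).contains k = true := by
      rw [PySem.Dict.contains_insert]; simp [hk]
    have h2 : (v.insert k y).contains s = true := by
      rw [PySem.Dict.contains_insert]; simp [hv]
    apply PySem.Dict.ext
    rw [PySem.Dict.items_insert_of_contains _ _ h1, PySem.Dict.items_insert_of_contains _ _ hv,
        PySem.Dict.items_insert_of_contains _ _ h2, PySem.Dict.items_insert_of_contains _ _ hk,
        List.map_map, List.map_map]
    apply List.map_congr_left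
    intro p _
    by_cases hps : p.1 = s
    · simp [Function.comp, hps, Ne.symm hks]
    · by_cases hpk : p.1 = k
      · simp [Function.comp, hpk, hks]
      · simp [Function.comp, hpk, hps]
  · have hk1 : (v.insert s x).contains k = false := by
      rw [PySem.Dict.contains_insert]
      simp only [Bool.or_eq_false_iff]
      exact ⟨by simp [hks], by simpa using hk⟩
    have h2 : (v.insert k y).contains s = true := by
      rw [PySem.Dict.contains_insert]; simp [hv]
    apply PySem.Dict.ext
    rw [PySem.Dict.items_insert_of_not_contains _ _ hk1, PySem.Dict.items_insert_of_contains _ _ hv,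
        PySem.Dict.items_insert_of_contains _ _ h2,
        PySem.Dict.items_insert_of_not_contains _ _ (by simpa using hk), List.map_append]
    simp [hks]

lemma pv_getD_foldl_ne (T : List (String × Int)) (s : String) :
    (∀ p ∈ T, p.1 ≠ s) →
    ∀ v : PySem.Dict String Int, (T.foldl pvAdd v).getD s 0 = v.getD s 0 := by
  induction T with
  | nil => intro _ v; simp
  | cons p T ih =>
    intro hT v
    rw [List.foldl_cons, ih (fun q hq => hT q (List.mem_cons_of_mem _ hq))]
    exact PySem.Dict.getD_insert_of_ne _ _ _ (Ne.symm (hT p List.mem_cons_self))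

lemma pv_stepA_inner (v : PySem.Dict String Int) (s : String) :
    (if v.contains s then v.insert s (v.getD s 0 + 1) else v.insert s 1) = pvBump v s := by
  by_cases h : v.contains s = true
  · simp [h, pvBump]
  · have h' : v.contains s = false := by simpa using h
    simp [h', pvBump, PySem.Dict.getD_of_not_contains _ _ h']

lemma pv_countStr_eq (xs : List (List Int)) :
    pvCountStr xs = PySem.Dict.counter (xs.map stringify) := by
  rw [pvCountStr, ← PySem.Dict.foldl_insert_getD_add_one_eq_counter, List.foldl_map]

-- modify twice at one key composes
lemma pv_modify_modify (d : PySem.Dict String (PySem.Dict String Int)) (c : String)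
    (f g : PySem.Dict String Int → PySem.Dict String Int) :
    (d.modify c PySem.Dict.empty f).modify c PySem.Dict.empty g
      = d.modify c PySem.Dict.empty (fun x => g (f x)) := by
  simp [PySem.Dict.modify, PySem.Dict.getD_insert_self, PySem.Dict.insert_insert_self]

lemma pv_foldl_modify_fold {α : Type} (c : String) (F : α → PySem.Dict String Int → PySem.Dict String Int)
    (l : List α) :
    ∀ (g : PySem.Dict String Int → PySem.Dict String Int) (d : PySem.Dict String (PySem.Dict String Int)),
      l.foldl (fun d y => d.modify c PySem.Dict.empty (F y)) (d.modify c PySem.Dict.empty g)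
        = d.modify c PySem.Dict.empty (fun x => l.foldl (fun x y => F y x) (g x)) := by
  induction l with
  | nil => intro g d; simp
  | cons y l ih =>
    intro g d
    rw [List.foldl_cons, pv_modify_modify, ih]
    rfl

lemma pv_foldl_add_insert (T : List (String × Int)) (s : String) :
    (∀ p ∈ T, p.1 ≠ s) →
    ∀ (v : PySem.Dict String Int) (x : Int), v.contains s = true →
      T.foldl pvAdd (v.insert s x) = (T.foldl pvAdd v).insert s x := by
  induction T with
  | nil => intro _ v x _; simp
  | cons p T ih =>
    intro hT v x hv
    have hp : p.1 ≠ s := hT p List.mem_cons_self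
    simp only [List.foldl_cons]
    have hstep : pvAdd (v.insert s x) p = (pvAdd v p).insert s x := by
      show (v.insert s x).insert p.1 ((v.insert s x).getD p.1 0 + p.2) = _
      rw [PySem.Dict.getD_insert_of_ne _ _ _ hp]
      exact pv_insert_comm v s p.1 x _ hv hp
    rw [hstep]
    exact ih (fun q hq => hT q (List.mem_cons_of_mem _ hq)) (pvAdd v p) x
      (by show (v.insert p.1 _).contains s = true
          rw [PySem.Dict.contains_insert]; simp [hv])

-- folding an item list with one entry bumped = fold the original then bump that key
lemma pv_fold_map_bump (L : List (String × Int)) (s : String) :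
    (L.map Prod.fst).Nodup →
    ∀ v : PySem.Dict String Int,
      (L.map (fun p => if p.1 == s then (s, p.2 + 1) else p)).foldl pvAdd v
        = if s ∈ L.map Prod.fst then pvBump (L.foldl pvAdd v) s else L.foldl pvAdd v := by
  induction L with
  | nil => intro _ v; simp
  | cons p T ih =>
    intro hnd v
    obtain ⟨k, w⟩ := p
    have hnd' : (T.map Prod.fst).Nodup := (List.nodup_cons.mp (by simpa using hnd)).2
    by_cases hks : k = s
    · subst hks
      have hkT : k ∉ T.map Prod.fst := (List.nodup_cons.mp (by simpa using hnd)).1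
      have hsT : ∀ q ∈ T, q.1 ≠ k := by
        intro q hq h
        exact hkT (h ▸ List.mem_map_of_mem hq)
      simp only [List.map_cons, List.foldl_cons]
      rw [if_pos (by simp)]
      have hmapT : T.map (fun q => if q.1 == k then (k, q.2 + 1) else q) = T := by
        conv_rhs => rw [← List.map_id T]
        exact List.map_congr_left fun q hq => by simp [hsT q hq]
      rw [hmapT, if_pos (by simp)]
      show T.foldl pvAdd (v.insert k (v.getD k 0 + (w + 1)))
        = pvBump (T.foldl pvAdd (v.insert k (v.getD k 0 + w))) k
      have hvs : (v.insert k (v.getD k 0 + w)).contains k = true := by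
        rw [PySem.Dict.contains_insert]; simp
      show _ = (T.foldl pvAdd (v.insert k (v.getD k 0 + w))).insert k
        ((T.foldl pvAdd (v.insert k (v.getD k 0 + w))).getD k 0 + 1)
      rw [pv_getD_foldl_ne T k hsT, PySem.Dict.getD_insert_self,
          ← pv_foldl_add_insert T k hsT _ _ hvs, PySem.Dict.insert_insert_self, add_assoc]
    · simp only [List.map_cons, List.foldl_cons]
      rw [if_neg (by simp [hks])]
      show (T.map _).foldl pvAdd (pvAdd v (k, w)) = _
      rw [ih hnd' (pvAdd v (k, w))]
      by_cases hm : s ∈ T.map Prod.fst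
      · rw [if_pos hm, if_pos (by simp [hm])]
      · have hsk : s ≠ k := Ne.symm hks
        rw [if_neg hm, if_neg (by simp [hm, hsk])]

-- the core: per-melody bumping = merging the counter of the melodies
lemma pv_inner_eq (ms : List String) :
    ∀ v : PySem.Dict String Int, ms.foldl pvBump v = (PySem.Dict.counter ms).items.foldl pvAdd v := by
  induction ms using List.reverseRecOn with
  | nil => intro v; rfl
  | append_singleton ms x ih =>
    intro v
    rw [List.foldl_append, PySem.Dict.counter_append_singleton]
    simp only [List.foldl_cons, List.foldl_nil, PySem.Dict.modify]
    by_cases hc : (PySem.Dict.counter ms).contains x = true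
    · rw [PySem.Dict.items_insert_of_contains _ _ hc]
      have hval : ∀ p ∈ (PySem.Dict.counter ms).items,
          (if p.1 == x then ((x : String), (PySem.Dict.counter ms).getD x 0 + 1) else p)
            = (if p.1 == x then (x, p.2 + 1) else p) := by
        intro p hp
        by_cases hpx : p.1 = x
        · rw [PySem.Dict.items_counter] at hp
          obtain ⟨kk, _, rfl⟩ := List.mem_map.mp hp
          have hkx : kk = x := hpx
          subst hkx
          simp [PySem.Dict.getD_counter]
        · simp [hpx]
      rw [List.map_congr_left hval]
      have hnd : ((PySem.Dict.counter ms).items.map Prod.fst).Nodup := by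
        simpa [PySem.Dict.keys] using PySem.Dict.nodup_keys_counter ms
      rw [pv_fold_map_bump _ x hnd v]
      have hmem : x ∈ (PySem.Dict.counter ms).items.map Prod.fst := by
        simpa [PySem.Dict.keys] using (PySem.Dict.contains_iff_mem_keys (PySem.Dict.counter ms) x).mp hc
      rw [if_pos hmem, ih v]
    · rw [PySem.Dict.items_insert_of_not_contains _ _ (by simpa using hc),
          PySem.Dict.getD_of_not_contains _ _ (by simpa using hc), List.foldl_append]
      simp only [List.foldl_cons, List.foldl_nil]
      rw [ih v]
      simp [pvAdd, pvBump]

lemma pv_fold_modify_eq {α β : Type} (c : String)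
    (F : α → PySem.Dict String Int → PySem.Dict String Int)
    (G : β → PySem.Dict String Int → PySem.Dict String Int)
    (l1 : List α) (l2 : List β)
    (hfold : ∀ v : PySem.Dict String Int, l1.foldl (fun v a => F a v) v = l2.foldl (fun v b => G b v) v)
    (hnil : l1 = [] ↔ l2 = []) (d : PySem.Dict String (PySem.Dict String Int)) :
    l1.foldl (fun d a => d.modify c PySem.Dict.empty (F a)) d
      = l2.foldl (fun d b => d.modify c PySem.Dict.empty (G b)) d := by
  cases l1 with
  | nil =>
    have h2 : l2 = [] := hnil.mp rfl
    subst h2; rfl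
  | cons a t1 =>
    cases l2 with
    | nil => exact absurd (hnil.mpr rfl) (by simp)
    | cons b t2 =>
      simp only [List.foldl_cons]
      rw [pv_foldl_modify_fold c F t1 (F a) d, pv_foldl_modify_fold c G t2 (G b) d]
      congr 1
      funext x
      simpa using hfold x

-- same collapse, with the loop body written as pvStepB writes it
lemma pv_foldl_modify_fold' (c : String) (l : List (String × Int)) :
    ∀ (g : PySem.Dict String Int → PySem.Dict String Int) (d : PySem.Dict String (PySem.Dict String Int)),
      l.foldl (fun acc kv => acc.modify c PySem.Dict.empty
          (fun inner => inner.insert kv.1 (inner.getD kv.1 0 + kv.2)))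
        (d.modify c PySem.Dict.empty g)
        = d.modify c PySem.Dict.empty (fun x => l.foldl pvAdd (g x)) := by
  induction l with
  | nil => intro g d; simp
  | cons y l ih =>
    intro g d
    rw [List.foldl_cons, pv_modify_modify, ih]
    rfl

-- A's inner double loop equals the per-chord merge of the melody counter
lemma pv_step_eq (melodies : List (List Int)) (acc : PySem.Dict String (PySem.Dict String Int)) (chord : List Int) :
    pvStepA melodies acc chord = pvStepB (PySem.Dict.counter (melodies.map stringify)) acc chord := by
  simp only [pvStepA, pvStepB]
  have hens : (if acc.contains (stringify chord) then acc else acc.insert (stringify chord) PySem.Dict.empty)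
      = acc.setdefault (stringify chord) PySem.Dict.empty := by
    by_cases h : acc.contains (stringify chord) = true
    · rw [if_pos h, PySem.Dict.setdefault_of_contains _ _ h]
    · rw [if_neg (by simpa using h),
          PySem.Dict.setdefault_of_not_contains _ _ (by simpa using h)]
  rw [hens]
  apply pv_fold_modify_eq (stringify chord)
    (fun (melody : List Int) (inner : PySem.Dict String Int) =>
      if inner.contains (stringify melody) then inner.insert (stringify melody) (inner.getD (stringify melody) 0 + 1)
      else inner.insert (stringify melody) 1)
    (fun (kv : String × Int) (inner : PySem.Dict String Int) => inner.insert kv.1 (inner.getD kv.1 0 + kv.2))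
  · intro v
    have h1 : (melodies.map stringify).foldl (fun v m =>
            if v.contains m then v.insert m (v.getD m 0 + 1) else v.insert m 1) v
        = melodies.foldl (fun v melody =>
        if v.contains (stringify melody) then v.insert (stringify melody) (v.getD (stringify melody) 0 + 1)
        else v.insert (stringify melody) 1) v := by
      rw [List.foldl_map]
    rw [← h1]
    have h2 : (fun (v : PySem.Dict String Int) (m : String) =>
        if v.contains m then v.insert m (v.getD m 0 + 1) else v.insert m 1) = pvBump :=
      funext fun v => funext fun m => pv_stepA_inner v m
    rw [h2]
    exact pv_inner_eq (melodies.map stringify) v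
  · constructor
    · intro h; subst h; rfl
    · intro h
      cases melodies with
      | nil => rfl
      | cons mel t =>
        exfalso
        have hcontains : (PySem.Dict.counter ((mel :: t).map stringify)).contains (stringify mel) = true := by
          rw [PySem.Dict.contains_counter]
          simp
        rw [PySem.Dict.contains] at hcontains
        rw [h] at hcontains
        simp at hcontains

-- first-match lookup in a raw pair list
def pvFind (l : List (String × Int)) (k : String) : Int :=
  match l.find? (fun q => q.1 == k) with
  | some q => q.2
  | none => 0

lemma pv_getD_mk (l : List (String × Int)) (k : String) :
    (PySem.Dict.mk l).getD k 0 = pvFind l k := by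
  induction l with
  | nil =>
    rw [PySem.Dict.getD_eq_get?_getD]
    have h : ({ items := [] } : PySem.Dict String Int).get? k = none := rfl
    rw [h]; rfl
  | cons p l ih =>
    obtain ⟨a, b⟩ := p
    rw [PySem.Dict.getD_eq_get?_getD, PySem.Dict.get?_mk_cons]
    by_cases h : a = k
    · simp [pvFind, List.find?, h]
    · have hb : (a == k) = false := by simpa using h
      rw [hb]
      simp only [Bool.false_eq_true, if_false]
      rw [← PySem.Dict.getD_eq_get?_getD, ih]
      simp [pvFind, List.find?, hb]

lemma pv_all_bne {ν : Type} (l : List (String × ν)) (k : String) :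
    (l.all (fun p => p.1 != k)) = !(l.any (fun p => p.1 == k)) := by
  induction l with
  | nil => simp
  | cons p l ih =>
    simp only [List.all_cons, List.any_cons, Bool.not_or]
    rw [← ih]
    simp [bne]

lemma pv_find_not_mem (L : List (String × Int)) (k : String) (h : k ∉ L.map Prod.fst) :
    pvFind L k = 0 := by
  have hn : L.find? (fun q => q.1 == k) = none := by
    rw [List.find?_eq_none]
    intro q hq
    simp only [beq_iff_eq]
    exact fun hqk => h (hqk ▸ List.mem_map_of_mem hq)
  simp [pvFind, hn]

-- the fundamental merge lemma: folding pvAdd over a nodup pair list, at the items level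
lemma pv_merge_items (L : List (String × Int)) (hL : (L.map Prod.fst).Nodup) :
    ∀ (v : PySem.Dict String Int), v.keys.Nodup →
      (L.foldl pvAdd v).items
        = v.items.map (fun p => (p.1, p.2 + pvFind L p.1)) ++ L.filter (fun q => !v.contains q.1) := by
  induction L with
  | nil =>
    intro v hv
    simp only [List.foldl_nil, List.filter_nil, List.append_nil]
    conv_lhs => rw [← List.map_id v.items]
    apply List.map_congr_left
    intro p _
    simp [pvFind, List.find?]
  | cons q L ih =>
    intro v hv
    obtain ⟨qk, qv⟩ := q
    have hq : qk ∉ L.map Prod.fst := (List.nodup_cons.mp (by simpa using hL)).1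
    have hL' : (L.map Prod.fst).Nodup := (List.nodup_cons.mp (by simpa using hL)).2
    have hLne : ∀ r ∈ L, r.1 ≠ qk := fun r hr h => hq (h ▸ List.mem_map_of_mem hr)
    rw [List.foldl_cons]
    by_cases hc : v.contains qk = true
    · have hv' : (pvAdd v (qk, qv)).keys.Nodup := PySem.Dict.nodup_keys_insert _ _ _ hv
      rw [ih hL' _ hv']
      have hitems : (pvAdd v (qk, qv)).items
          = v.items.map (fun p => if p.1 == qk then (qk, v.getD qk 0 + qv) else p) :=
        PySem.Dict.items_insert_of_contains _ _ hc
      rw [hitems, List.map_map]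
      congr 1
      · apply List.map_congr_left
        intro p hp
        obtain ⟨pk, pw⟩ := p
        by_cases hpk : pk = qk
        · subst hpk
          have hgd : v.getD pk 0 = pw := PySem.Dict.getD_of_mem_items v hp hv 0
          simp only [Function.comp, beq_self_eq_true, if_true]
          rw [pv_find_not_mem L pk hq, hgd]
          simp [pvFind, List.find?]
        · have hb : (pk == qk) = false := by simpa using hpk
          simp only [Function.comp, hb, Bool.false_eq_true, if_false]
          have hb2 : (qk == pk) = false := by simpa using (Ne.symm hpk)
          simp [pvFind, List.find?, hb2]
      · rw [List.filter_cons]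
        simp only [hc, Bool.not_true, Bool.false_eq_true, if_false]
        apply List.filter_congr
        intro r hr
        have hrb : (r.1 == qk) = false := by simpa using hLne r hr
        have : (pvAdd v (qk, qv)).contains r.1 = (r.1 == qk || v.contains r.1) :=
          PySem.Dict.contains_insert v qk r.1 _
        rw [this, hrb]
        simp
    · have hcf : v.contains qk = false := by simpa using hc
      have hnk : qk ∉ v.keys := by
        intro h
        exact absurd ((PySem.Dict.contains_iff_mem_keys v qk).mpr h) (by simp [hcf])
      have hv' : (pvAdd v (qk, qv)).keys.Nodup := PySem.Dict.nodup_keys_insert _ _ _ hv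
      rw [ih hL' _ hv']
      have hitems : (pvAdd v (qk, qv)).items = v.items ++ [(qk, v.getD qk 0 + qv)] :=
        PySem.Dict.items_insert_of_not_contains _ _ hcf
      rw [hitems, List.map_append]
      have hvne : ∀ p ∈ v.items, p.1 ≠ qk := by
        intro p hp h
        exact hnk (h ▸ (by exact List.mem_map_of_mem hp : p.1 ∈ v.keys))
      rw [PySem.Dict.getD_of_not_contains _ _ hcf]
      rw [List.filter_cons]
      simp only [hcf, Bool.not_false, if_true]
      rw [List.append_assoc]
      congr 1
      · apply List.map_congr_left
        intro p hp
        have hb2 : (qk == p.1) = false := by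
          simpa using (Ne.symm (hvne p hp))
        simp [pvFind, List.find?, hb2]
      · simp only [List.map_cons, List.map_nil, List.singleton_append]
        rw [pv_find_not_mem L qk hq]
        have : (0 : Int) + qv + 0 = qv := by ring
        rw [this]
        congr 1
        apply List.filter_congr
        intro r hr
        have hrb : (r.1 == qk) = false := by simpa using hLne r hr
        have hci : (pvAdd v (qk, qv)).contains r.1 = (r.1 == qk || v.contains r.1) :=
          PySem.Dict.contains_insert v qk r.1 _
        rw [hci, hrb]
        simp

lemma pv_items_nodup {ν : Type} (m : PySem.Dict String ν) : (m.items.map Prod.fst).Nodup ↔ m.keys.Nodup := by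
  rw [PySem.Dict.keys]

lemma pv_getD_eq_find (m : PySem.Dict String Int) (k : String) :
    m.getD k 0 = pvFind m.items k := pv_getD_mk m.items k

lemma pv_contains_any' {ν : Type} (m : PySem.Dict String ν) (k : String) :
    m.contains k = m.items.any (fun p => p.1 == k) := PySem.Dict.contains_mk m.items k

-- keys of a bumped row: the old keys then the fresh melody keys
lemma pv_bumped_keys (m : PySem.Dict String Int) (t : Int) (inner : List (String × Int)) :
    (pvBumped m t inner).map Prod.fst
      = inner.map Prod.fst ++ ((m.items.filter (fun q => inner.all (fun p => p.1 != q.1))).map Prod.fst) := by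
  simp only [pvBumped, List.map_append, List.map_map]
  rfl

lemma pv_bumped_nodup (m : PySem.Dict String Int) (hm : m.keys.Nodup) (t : Int)
    (inner : List (String × Int)) (hv : (inner.map Prod.fst).Nodup) :
    ((pvBumped m t inner).map Prod.fst).Nodup := by
  rw [pv_bumped_keys]
  apply List.Nodup.append hv
  · have hsub : ((m.items.filter (fun q => inner.all (fun p => p.1 != q.1))).map Prod.fst).Sublist
        (m.items.map Prod.fst) := List.Sublist.map Prod.fst List.filter_sublist
    exact hsub.nodup ((pv_items_nodup m).mpr hm)
  · intro k hk1 hk2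
    obtain ⟨q, hq, rfl⟩ := List.mem_map.mp hk2
    have hall := List.of_mem_filter hq
    rw [pv_all_bne] at hall
    have : inner.any (fun p => p.1 == q.1) = true := by
      obtain ⟨p, hp, hpk⟩ := List.mem_map.mp hk1
      exact List.any_eq_true.mpr ⟨p, hp, by simp [hpk]⟩
    simp [this] at hall

-- every count-table key occurs in a bumped row
lemma pv_bumped_contains (m : PySem.Dict String Int) (t : Int) (inner : List (String × Int))
    (q : String × Int) (hq : q ∈ m.items) :
    ((⟨pvBumped m t inner⟩ : PySem.Dict String Int)).contains q.1 = true := by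
  rw [pv_contains_any']
  show (pvBumped m t inner).any (fun p => p.1 == q.1) = true
  by_cases hin : inner.any (fun p => p.1 == q.1) = true
  · obtain ⟨p, hp, hpk⟩ := List.any_eq_true.mp hin
    exact List.any_eq_true.mpr ⟨_, List.mem_append_left _ (List.mem_map_of_mem hp), hpk⟩
  · have hfil : q ∈ m.items.filter (fun r => inner.all (fun p => p.1 != r.1)) := by
      apply List.mem_filter.mpr ⟨hq, ?_⟩
      rw [pv_all_bne, Bool.not_eq_true']
      exact Bool.eq_false_iff.mpr hin
    exact List.any_eq_true.mpr ⟨(q.1, t * q.2),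
      List.mem_append_right _ (List.mem_map.mpr ⟨q, hfil, rfl⟩), by simp⟩

-- one merge of the count table into a row bumped t times bumps it t+1 times
lemma pv_merge_next (m : PySem.Dict String Int) (hm : m.keys.Nodup)
    (inner : List (String × Int)) (hv : (inner.map Prod.fst).Nodup) (t : Int) :
    (m.items.foldl pvAdd (⟨pvBumped m t inner⟩ : PySem.Dict String Int)).items
      = pvBumped m (t + 1) inner := by
  have hmL : (m.items.map Prod.fst).Nodup := (pv_items_nodup m).mpr hm
  have hvk : ((⟨pvBumped m t inner⟩ : PySem.Dict String Int)).keys.Nodup := by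
    show ((pvBumped m t inner).map Prod.fst).Nodup
    exact pv_bumped_nodup m hm t inner hv
  rw [pv_merge_items m.items hmL _ hvk]
  have hfil : m.items.filter (fun q => !((⟨pvBumped m t inner⟩ : PySem.Dict String Int)).contains q.1) = [] := by
    apply List.filter_eq_nil_iff.mpr
    intro q hq
    rw [pv_bumped_contains m t inner q hq]
    simp
  rw [hfil, List.append_nil]
  show (pvBumped m t inner).map _ = _
  rw [pvBumped, pvBumped, List.map_append, List.map_map, List.map_map]
  congr 1
  · apply List.map_congr_left
    intro p _
    simp only [Function.comp]
    rw [← pv_getD_eq_find]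
    show (p.1, p.2 + t * m.getD p.1 0 + m.getD p.1 0) = (p.1, p.2 + (t + 1) * m.getD p.1 0)
    congr 1
    ring
  · apply List.map_congr_left
    intro q hq
    have hqm : q ∈ m.items := List.mem_of_mem_filter hq
    simp only [Function.comp]
    rw [← pv_getD_eq_find]
    have : m.getD q.1 0 = q.2 := PySem.Dict.getD_of_mem_items m (by exact hqm) hm 0
    rw [this]
    show (q.1, t * q.2 + q.2) = (q.1, (t + 1) * q.2)
    congr 1
    ring

-- one merge of the count table into an untouched row bumps it once
lemma pv_merge_once (m : PySem.Dict String Int) (hm : m.keys.Nodup)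
    (inner : List (String × Int)) (hv : (inner.map Prod.fst).Nodup) :
    (m.items.foldl pvAdd (⟨inner⟩ : PySem.Dict String Int)).items = pvBumped m 1 inner := by
  have hmL : (m.items.map Prod.fst).Nodup := (pv_items_nodup m).mpr hm
  rw [pv_merge_items m.items hmL _ (by exact hv)]
  rw [pvBumped]
  congr 1
  · apply List.map_congr_left
    intro p _
    rw [← pv_getD_eq_find]
    simp
  · have hfc : m.items.filter (fun q => !((⟨inner⟩ : PySem.Dict String Int)).contains q.1)
        = m.items.filter (fun q => inner.all (fun p => p.1 != q.1)) := by
      apply List.filter_congr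
      intro q _
      rw [pv_all_bne, pv_contains_any']
    rw [hfc]
    conv_lhs => rw [← List.map_id (m.items.filter (fun q => inner.all (fun p => p.1 != q.1)))]
    apply List.map_congr_left
    intro q _
    simp

-- items-level characterisation of one pvStepB step
lemma pv_stepB_items (m : PySem.Dict String Int) (D : PySem.Dict String (PySem.Dict String Int))
    (c : List Int) (hD : D.keys.Nodup) :
    (pvStepB m D c).items =
      if D.contains (stringify c)
      then D.items.map (fun p => if p.1 == stringify c then (p.1, m.items.foldl pvAdd p.2) else p)
      else D.items ++ [(stringify c, m.items.foldl pvAdd PySem.Dict.empty)] := by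
  simp only [pvStepB]
  by_cases hc : D.contains (stringify c) = true
  · rw [PySem.Dict.setdefault_of_contains _ _ hc, if_pos hc]
    cases hm : m.items with
    | nil =>
      simp only [List.foldl_nil]
      conv_lhs => rw [← List.map_id D.items]
      apply List.map_congr_left
      intro p _
      obtain ⟨a, b⟩ := p
      by_cases h : a = stringify c <;> simp [h]
    | cons kv rest =>
      rw [List.foldl_cons, pv_foldl_modify_fold' (stringify c) rest]
      have h1 : (fun x : PySem.Dict String Int =>
            rest.foldl pvAdd (x.insert kv.1 (x.getD kv.1 0 + kv.2)))
          = (fun x : PySem.Dict String Int => m.items.foldl pvAdd x) := by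
        funext x
        rw [hm]
        rfl
      rw [h1]
      have h2 : D.modify (stringify c) PySem.Dict.empty
            (fun x => m.items.foldl pvAdd x)
          = D.insert (stringify c)
            (m.items.foldl pvAdd (D.getD (stringify c) PySem.Dict.empty)) := by
        simp [PySem.Dict.modify]
      rw [h2, PySem.Dict.items_insert_of_contains _ _ hc]
      apply List.map_congr_left
      intro p hp
      by_cases h : p.1 = stringify c
      · have hb : (p.1 == stringify c) = true := by simpa using h
        rw [hb]
        simp only [if_true]
        have hgd : D.getD (stringify c) PySem.Dict.empty = p.2 := by
          apply PySem.Dict.getD_of_mem_items D _ hD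
          rw [← h]
          exact hp
        rw [hgd, h, hm]
      · have hb : (p.1 == stringify c) = false := by simpa using h
        rw [hb]
        simp
  · have hcf : D.contains (stringify c) = false := by simpa using hc
    rw [PySem.Dict.setdefault_of_not_contains _ _ hcf, if_neg (by simp [hcf])]
    cases hm : m.items with
    | nil =>
      simp only [List.foldl_nil]
      rw [PySem.Dict.items_insert_of_not_contains _ _ hcf]
    | cons kv rest =>
      rw [List.foldl_cons, pv_foldl_modify_fold' (stringify c) rest]
      have h1 : (fun x : PySem.Dict String Int =>
            rest.foldl pvAdd (x.insert kv.1 (x.getD kv.1 0 + kv.2)))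
          = (fun x : PySem.Dict String Int => m.items.foldl pvAdd x) := by
        funext x
        rw [hm]
        rfl
      rw [h1]
      have h2 : (D.insert (stringify c) PySem.Dict.empty).modify (stringify c) PySem.Dict.empty
            (fun x => m.items.foldl pvAdd x)
          = D.insert (stringify c) (m.items.foldl pvAdd PySem.Dict.empty) := by
        simp [PySem.Dict.modify, PySem.Dict.getD_insert_self, PySem.Dict.insert_insert_self]
      rw [h2, PySem.Dict.items_insert_of_not_contains _ _ hcf, hm]

-- filtering the items of a bumped counter, when the bumped key is a corp key (fails the filter)
lemma pv_filter_modify_false (cd : PySem.Dict String Int) (key : String)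
    (rows : List (String × PySem.Dict String Int))
    (hQ : rows.any (fun p => p.1 == key) = true) :
    ((cd.modify key 0 (fun x => x + 1)).items.filter (fun q => !(rows.any (fun p => p.1 == q.1))))
      = cd.items.filter (fun q => !(rows.any (fun p => p.1 == q.1))) := by
  have hmod : cd.modify key 0 (fun x => x + 1) = cd.insert key (cd.getD key 0 + 1) := by
    simp [PySem.Dict.modify]
  rw [hmod]
  by_cases hc : cd.contains key = true
  · rw [PySem.Dict.items_insert_of_contains _ _ hc, List.filter_map]
    have hP : ∀ q ∈ cd.items,
        ((fun q => !(rows.any (fun p => p.1 == q.1)))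
            ∘ (fun p => if p.1 == key then (key, cd.getD key 0 + 1) else p)) q
          = !(rows.any (fun p => p.1 == q.1)) := by
      intro q _
      by_cases h : q.1 = key <;> simp [h, Function.comp]
    rw [List.filter_congr hP]
    conv_rhs => rw [← List.map_id (cd.items.filter (fun q => !(rows.any (fun p => p.1 == q.1))))]
    apply List.map_congr_left
    intro q hq
    have hqk : q.1 ≠ key := by
      intro h
      have hmem := List.of_mem_filter hq
      rw [h, hQ] at hmem
      simp at hmem
    simp [hqk]
  · rw [PySem.Dict.items_insert_of_not_contains _ _ (by simpa using hc), List.filter_append]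
    simp [hQ]

-- filtering the items of a bumped counter, when the bumped key is not a corp key
lemma pv_filter_modify_true (cd : PySem.Dict String Int) (key : String)
    (rows : List (String × PySem.Dict String Int))
    (hQ : rows.any (fun p => p.1 == key) = false) :
    ((cd.modify key 0 (fun x => x + 1)).items.filter (fun q => !(rows.any (fun p => p.1 == q.1))))
      = if cd.contains key
        then (cd.items.filter (fun q => !(rows.any (fun p => p.1 == q.1)))).map
          (fun q => if q.1 == key then (key, cd.getD key 0 + 1) else q)
        else cd.items.filter (fun q => !(rows.any (fun p => p.1 == q.1)))
          ++ [(key, cd.getD key 0 + 1)] := by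
  have hmod : cd.modify key 0 (fun x => x + 1) = cd.insert key (cd.getD key 0 + 1) := by
    simp [PySem.Dict.modify]
  rw [hmod]
  by_cases hc : cd.contains key = true
  · rw [if_pos hc, PySem.Dict.items_insert_of_contains _ _ hc, List.filter_map]
    have hP : ∀ q ∈ cd.items,
        ((fun q => !(rows.any (fun p => p.1 == q.1)))
            ∘ (fun p => if p.1 == key then (key, cd.getD key 0 + 1) else p)) q
          = !(rows.any (fun p => p.1 == q.1)) := by
      intro q _
      by_cases h : q.1 = key <;> simp [h, Function.comp]
    rw [List.filter_congr hP]
  · rw [if_neg hc, PySem.Dict.items_insert_of_not_contains _ _ (by simpa using hc),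
        List.filter_append]
    simp [hQ]

-- the closed form maintained through the chord loop
def pvClosed (m cd : PySem.Dict String Int) (rows : List (String × PySem.Dict String Int)) :
    List (String × PySem.Dict String Int) :=
  rows.map (fun p => if cd.contains p.1 then (p.1, (⟨pvBumped m (cd.getD p.1 0) p.2.items⟩ : PySem.Dict String Int)) else p)
  ++ (cd.items.filter (fun q => !(rows.any (fun p => p.1 == q.1)))).map
      (fun q => (q.1, (⟨pvBumped m q.2 []⟩ : PySem.Dict String Int)))

lemma pv_closed_keys (m cd : PySem.Dict String Int) (rows : List (String × PySem.Dict String Int)) :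
    (pvClosed m cd rows).map Prod.fst
      = rows.map Prod.fst
        ++ (cd.items.filter (fun q => !(rows.any (fun p => p.1 == q.1)))).map Prod.fst := by
  rw [pvClosed, List.map_append, List.map_map, List.map_map]
  congr 1
  apply List.map_congr_left
  intro p _
  by_cases h : cd.contains p.1 = true <;> simp [h, Function.comp]

lemma pv_closed_nodup (m cd : PySem.Dict String Int) (rows : List (String × PySem.Dict String Int))
    (hrows : (rows.map Prod.fst).Nodup) (hcd : cd.keys.Nodup) :
    ((pvClosed m cd rows).map Prod.fst).Nodup := by
  rw [pv_closed_keys]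
  apply List.Nodup.append hrows
  · have hsub : ((cd.items.filter (fun q => !(rows.any (fun p => p.1 == q.1)))).map Prod.fst).Sublist
        (cd.items.map Prod.fst) := List.Sublist.map Prod.fst List.filter_sublist
    exact hsub.nodup ((pv_items_nodup cd).mpr hcd)
  · intro k hk1 hk2
    obtain ⟨q, hq, rfl⟩ := List.mem_map.mp hk2
    have hfil := List.of_mem_filter hq
    obtain ⟨p, hp, hpk⟩ := List.mem_map.mp hk1
    have hany : rows.any (fun p => p.1 == q.1) = true :=
      List.any_eq_true.mpr ⟨p, hp, by simp [hpk]⟩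
    rw [hany] at hfil
    simp at hfil

-- key membership in the closed form: a corp key or a chord key
lemma pv_closed_any (m cd : PySem.Dict String Int) (rows : List (String × PySem.Dict String Int))
    (key : String) :
    ((pvClosed m cd rows).any (fun p => p.1 == key))
      = (rows.any (fun p => p.1 == key) || cd.items.any (fun q => q.1 == key)) := by
  by_cases hr : rows.any (fun p => p.1 == key) = true
  · rw [hr]
    simp only [Bool.true_or]
    obtain ⟨p, hp, hpk⟩ := List.any_eq_true.mp hr
    apply List.any_eq_true.mpr
    refine ⟨(if cd.contains p.1 then (p.1, (⟨pvBumped m (cd.getD p.1 0) p.2.items⟩ : PySem.Dict String Int)) else p), ?_, ?_⟩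
    · exact List.mem_append_left _ (List.mem_map_of_mem hp)
    · by_cases h : cd.contains p.1 = true <;> simp [h, hpk]
  · have hrf : rows.any (fun p => p.1 == key) = false := Bool.eq_false_iff.mpr hr
    rw [hrf, Bool.false_or]
    by_cases hcdk : cd.items.any (fun q => q.1 == key) = true
    · rw [hcdk]
      obtain ⟨q, hq, hqk⟩ := List.any_eq_true.mp hcdk
      apply List.any_eq_true.mpr
      refine ⟨(q.1, (⟨pvBumped m q.2 []⟩ : PySem.Dict String Int)), ?_, hqk⟩
      apply List.mem_append_right
      apply List.mem_map.mpr
      refine ⟨q, List.mem_filter.mpr ⟨hq, ?_⟩, rfl⟩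
      have hqkey : q.1 = key := by simpa using hqk
      rw [hqkey, hrf]
      simp
    · have hcf : cd.items.any (fun q => q.1 == key) = false := Bool.eq_false_iff.mpr hcdk
      rw [hcf]
      apply List.any_eq_false.mpr
      intro x hx
      rcases List.mem_append.mp hx with hx1 | hx2
      · obtain ⟨p, hp, rfl⟩ := List.mem_map.mp hx1
        have hne := List.any_eq_false.mp hrf p hp
        by_cases h : cd.contains p.1 = true <;> simpa [h] using hne
      · obtain ⟨q, hq, rfl⟩ := List.mem_map.mp hx2
        have hne := List.any_eq_false.mp hcf q (List.mem_of_mem_filter hq)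
        simpa using hne

-- one chord step on the closed form: bump that chord key's multiplicity by one
lemma pv_closed_step (m cd : PySem.Dict String Int) (rows : List (String × PySem.Dict String Int))
    (key : String) (hm : m.keys.Nodup) (hcd : cd.keys.Nodup)
    (hinner : ∀ p ∈ rows, (p.2.items.map Prod.fst).Nodup) :
    (if (rows.any (fun p => p.1 == key) || cd.items.any (fun q => q.1 == key))
     then (pvClosed m cd rows).map (fun p => if p.1 == key then (p.1, m.items.foldl pvAdd p.2) else p)
     else pvClosed m cd rows ++ [(key, m.items.foldl pvAdd PySem.Dict.empty)])
    = pvClosed m (cd.modify key 0 (fun x => x + 1)) rows := by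
  by_cases hkr : rows.any (fun p => p.1 == key) = true
  · rw [if_pos (by rw [hkr]; simp)]
    rw [pvClosed, pvClosed, List.map_append, List.map_map, List.map_map]
    rw [pv_filter_modify_false cd key rows hkr]
    congr 1
    · apply List.map_congr_left
      intro p hp
      by_cases h : p.1 = key
      · have hb : (p.1 == key) = true := by simpa using h
        have hget' : (cd.modify key 0 (fun x => x + 1)).getD p.1 0 = cd.getD key 0 + 1 := by
          rw [PySem.Dict.getD_modify, if_pos h]
        by_cases hpc : cd.contains p.1 = true
        · simp only [Function.comp, hpc, if_true, hb,
            PySem.Dict.contains_modify, Bool.true_or, hget']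
          rw [← h]
          congr 1
          apply PySem.Dict.ext
          exact pv_merge_next m hm p.2.items (hinner p hp) (cd.getD p.1 0)
        · have hpcf : cd.contains p.1 = false := by simpa using hpc
          have hkey0 : cd.getD key 0 = 0 := by
            rw [← h]
            exact PySem.Dict.getD_of_not_contains _ _ hpcf
          simp only [Function.comp, hpcf, Bool.false_eq_true, if_false, hb,
            PySem.Dict.contains_modify, Bool.true_or, if_true, hget', hkey0]
          congr 1
          apply PySem.Dict.ext
          rw [zero_add]
          exact pv_merge_once m hm p.2.items (hinner p hp)
      · have hb : (p.1 == key) = false := by simpa using h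
        by_cases hpc : cd.contains p.1 = true <;>
          simp [Function.comp, hb, hpc, PySem.Dict.contains_modify, PySem.Dict.getD_modify, h]
    · apply List.map_congr_left
      intro q hq
      have hqk : (q.1 == key) = false := by
        have hmem := List.of_mem_filter hq
        by_cases h : q.1 = key
        · rw [h, hkr] at hmem
          simp at hmem
        · simpa using h
      simp [Function.comp, hqk]
  · have hrf : rows.any (fun p => p.1 == key) = false := Bool.eq_false_iff.mpr hkr
    have hrne : ∀ p ∈ rows, (p.1 == key) = false := by
      intro p hp
      have := List.any_eq_false.mp hrf p hp
      simpa using this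
    by_cases hkc : cd.items.any (fun q => q.1 == key) = true
    · rw [if_pos (by rw [hrf, hkc]; simp)]
      have hcdc : cd.contains key = true := by rw [pv_contains_any']; exact hkc
      rw [pvClosed, pvClosed, List.map_append, List.map_map, List.map_map]
      rw [pv_filter_modify_true cd key rows hrf, if_pos hcdc]
      congr 1
      · apply List.map_congr_left
        intro p hp
        have hb : (p.1 == key) = false := hrne p hp
        have h : p.1 ≠ key := by simpa using hb
        by_cases hpc : cd.contains p.1 = true <;>
          simp [Function.comp, hb, hpc, PySem.Dict.contains_modify, PySem.Dict.getD_modify, h]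
      · rw [List.map_map]
        apply List.map_congr_left
        intro q hq
        have hqm : q ∈ cd.items := List.mem_of_mem_filter hq
        by_cases h : q.1 = key
        · have hb : (q.1 == key) = true := by simpa using h
          have hq2 : cd.getD key 0 = q.2 := by
            rw [← h]
            exact PySem.Dict.getD_of_mem_items cd hqm hcd 0
          simp only [Function.comp, hb, if_true]
          rw [← hq2, ← h]
          congr 1
          apply PySem.Dict.ext
          exact pv_merge_next m hm [] (by simp) (cd.getD q.1 0)
        · have hb : (q.1 == key) = false := by simpa using h
          simp [Function.comp, hb]
    · have hcf : cd.items.any (fun q => q.1 == key) = false := Bool.eq_false_iff.mpr hkc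
      rw [if_neg (by simp [hrf, hcf])]
      have hcdc : cd.contains key = false := by rw [pv_contains_any']; exact hcf
      rw [pvClosed, pvClosed]
      rw [pv_filter_modify_true cd key rows hrf, if_neg (by simp [hcdc]),
          PySem.Dict.getD_of_not_contains _ _ hcdc, List.map_append, List.append_assoc]
      congr 1
      · apply List.map_congr_left
        intro p hp
        have hb : (p.1 == key) = false := hrne p hp
        have h : p.1 ≠ key := by simpa using hb
        by_cases hpc : cd.contains p.1 = true <;>
          simp [hb, hpc, PySem.Dict.contains_modify, PySem.Dict.getD_modify, h]
      · congr 1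
        simp only [List.map_cons, List.map_nil]
        congr 2
        apply PySem.Dict.ext
        rw [zero_add]
        exact pv_merge_once m hm [] (by simp)

-- the chord fold computes the closed form
lemma pv_fold_items (m : PySem.Dict String Int) (hm : m.keys.Nodup)
    (corp : List (String × List (String × Int)))
    (hc : (corp.map Prod.fst).Nodup) (hr : ∀ p ∈ corp, (p.2.map Prod.fst).Nodup) :
    ∀ chs : List (List Int),
      (chs.foldl (pvStepB m) (pvWrap corp)).items
        = pvClosed m (PySem.Dict.counter (chs.map stringify)) (pvWrap corp).items := by
  have hrowskeys : (pvWrap corp).items.map Prod.fst = corp.map Prod.fst := by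
    show (corp.map (fun p => (p.1, (⟨p.2⟩ : PySem.Dict String Int)))).map Prod.fst = _
    rw [List.map_map]
    rfl
  have hrows : ((pvWrap corp).items.map Prod.fst).Nodup := by rw [hrowskeys]; exact hc
  have hinner : ∀ p ∈ (pvWrap corp).items, (p.2.items.map Prod.fst).Nodup := by
    intro p hp
    obtain ⟨x, hx, rfl⟩ := List.mem_map.mp hp
    exact hr x hx
  intro chs
  induction chs using List.reverseRecOn with
  | nil =>
    simp only [List.foldl_nil, List.map_nil]
    have hempty_items : (PySem.Dict.counter ([] : List String)).items = [] := rfl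
    rw [pvClosed, hempty_items]
    simp only [List.filter_nil, List.map_nil, List.append_nil]
    conv_lhs => rw [← List.map_id (pvWrap corp).items]
    apply List.map_congr_left
    intro p _
    have hcf : (PySem.Dict.counter ([] : List String)).contains p.1 = false := rfl
    simp [hcf]
  | append_singleton chs c ih =>
    rw [List.foldl_append, List.foldl_cons, List.foldl_nil]
    have hDnd : (chs.foldl (pvStepB m) (pvWrap corp)).keys.Nodup := by
      rw [← pv_items_nodup, ih]
      exact pv_closed_nodup m _ _ hrows (PySem.Dict.nodup_keys_counter _)
    rw [pv_stepB_items m _ c hDnd]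
    have hcontains : (chs.foldl (pvStepB m) (pvWrap corp)).contains (stringify c)
        = ((pvWrap corp).items.any (fun p => p.1 == stringify c)
           || (PySem.Dict.counter (chs.map stringify)).items.any (fun q => q.1 == stringify c)) := by
      rw [pv_contains_any', ih, pv_closed_any]
    rw [hcontains, ih]
    have hmap : (chs ++ [c]).map stringify = chs.map stringify ++ [stringify c] := by
      rw [List.map_append]
      rfl
    rw [hmap, PySem.Dict.counter_append_singleton]
    exact pv_closed_step m _ _ (stringify c) hm (PySem.Dict.nodup_keys_counter _) hinner

-- ===== VERDICT (by name: the statement is the Claim_ definition above) =====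
theorem update_duo_corp_spec : Claim_equal_update_duo_corp := by
  intro chords melodies corp _ hpre
  unfold Spec_update_duo_corp update_duo_corp update_duo_corp_alt
  obtain ⟨hc, hr⟩ := hpre
  have hstep : pvStepA melodies = pvStepB (PySem.Dict.counter (melodies.map stringify)) :=
    funext fun acc => funext fun chord => pv_step_eq melodies acc chord
  rw [hstep, pvUnwrap,
      pv_fold_items (PySem.Dict.counter (melodies.map stringify))
        (PySem.Dict.nodup_keys_counter _) corp hc hr chords]
  show (pvClosed (PySem.Dict.counter (melodies.map stringify))
        (PySem.Dict.counter (chords.map stringify)) (pvWrap corp).items).map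
          (fun p => (p.1, p.2.items))
      = corp.map (fun p => if (pvCountStr chords).contains p.1
            then (p.1, pvBumped (pvCountStr melodies) ((pvCountStr chords).getD p.1 0) p.2) else p)
        ++ ((pvCountStr chords).items.filter (fun q => corp.all (fun p => p.1 != q.1))).map
            (fun q => (q.1, (pvCountStr melodies).items.map (fun r => (r.1, q.2 * r.2))))
  rw [pv_countStr_eq chords, pv_countStr_eq melodies]
  have hWitems : (pvWrap corp).items
      = corp.map (fun p => (p.1, (⟨p.2⟩ : PySem.Dict String Int))) := rfl
  rw [pvClosed, List.map_append, hWitems, List.map_map, List.map_map]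
  congr 1
  · apply List.map_congr_left
    intro x hx
    by_cases h : (PySem.Dict.counter (chords.map stringify)).contains x.1 = true <;>
      simp [Function.comp, h]
  · have hfc : ∀ q ∈ (PySem.Dict.counter (chords.map stringify)).items,
        (!((corp.map (fun p => (p.1, (⟨p.2⟩ : PySem.Dict String Int)))).any
            (fun p => p.1 == q.1)))
          = corp.all (fun p => p.1 != q.1) := by
      intro q _
      rw [List.any_map, pv_all_bne]
      rfl
    rw [List.filter_congr hfc, List.map_map]
    apply List.map_congr_left
    intro q _
    simp [Function.comp, pvBumped]
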